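-- pv_equiv track=rewrite | github.com/whtlkeep/BAT-algorithms | 数组/求局部最大值.py | localmaximum
-- ===== SOURCE A (Python) =====
-- def localmaximum(array):
--     start = 0
--     end = len(array) - 1
--     while start < end:
--         mid = (start + end) >> 1
--         if array[mid] > array[mid + 1]:
--             end = mid
--         else:
--             start = mid + 1
--     return array[start]
-- ===== SOURCE B (Python) =====
-- def localmaximum(array):
--     if len(array) <= 1:
--         return array[0]
--     mid = (len(array) - 1) >> 1
--     if array[mid] > array[mid + 1]:
--         return localmaximum(array[:mid + 1])
--     return localmaximum(array[mid + 1:])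
-- ===== Notes on version B (the rewrite author's own statement) =====
-- stated objective: alternative
-- what changed: A's iterative two-index while loop over the fixed array is replaced by a recursive divide-and-conquer that keeps only the surviving half as a list slice at each step; both make the same O(log n) comparisons.
import Mathlib
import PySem

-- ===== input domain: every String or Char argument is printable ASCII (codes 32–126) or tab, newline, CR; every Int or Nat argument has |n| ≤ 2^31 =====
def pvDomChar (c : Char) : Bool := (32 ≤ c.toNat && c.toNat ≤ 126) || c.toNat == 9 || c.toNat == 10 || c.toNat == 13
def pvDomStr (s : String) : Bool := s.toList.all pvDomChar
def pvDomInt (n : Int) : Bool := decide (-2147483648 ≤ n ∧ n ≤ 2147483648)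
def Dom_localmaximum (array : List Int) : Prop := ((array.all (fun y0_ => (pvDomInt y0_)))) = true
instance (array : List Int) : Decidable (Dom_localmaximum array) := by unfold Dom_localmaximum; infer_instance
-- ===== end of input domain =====

-- B replaces A's two-index while loop with a recursive divide-and-conquer that keeps only the surviving half as a list slice (objective: alternative decomposition; same comparisons, no speed claim).
-- Both A and B raise IndexError on the empty list (at the final element access); Pre_ excludes exactly that input.

-- ===== PORT A =====
-- A's while loop as fuel-indexed tail recursion on (start, end); the fuel (e - start).toNat bounds the
-- iteration count (the window shrinks by at least 1 per step) and is only a totality guard.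
-- '(start+end) >> 1' is exactly floor division by 2.  pyGetD's default 0 is never used: under
-- Pre_ (array ≠ []) every index accessed is in range.
def localmaximumLoop (array : List Int) : Nat → Int → Int → Int
  | 0, start, _ => PySem.List.pyGetD array start 0
  | fuel + 1, start, e =>
    if start < e then
      let mid := PySem.Int.floordiv (start + e) 2
      if PySem.List.pyGetD array mid 0 > PySem.List.pyGetD array (mid + 1) 0 then
        localmaximumLoop array fuel start mid
      else
        localmaximumLoop array fuel (mid + 1) e
    else
      PySem.List.pyGetD array start 0

def localmaximum (array : List Int) : Int :=
  localmaximumLoop array ((array.length : Int) - 1 - 0).toNat 0 ((array.length : Int) - 1)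

-- ===== PORT B =====
-- recursion on the list itself: keep array[:mid+1] or array[mid+1:]; the fuel xs.length bounds the
-- recursion depth (each recursive call is on a strictly shorter list) and is only a totality guard.
def localmaximumAltGo : Nat → List Int → Int
  | 0, xs => PySem.List.pyGetD xs 0 0
  | fuel + 1, xs =>
    if xs.length ≤ 1 then
      PySem.List.pyGetD xs 0 0
    else
      let mid : Int := PySem.Int.floordiv ((xs.length : Int) - 1) 2
      if PySem.List.pyGetD xs mid 0 > PySem.List.pyGetD xs (mid + 1) 0 then
        localmaximumAltGo fuel (PySem.List.slice xs none (some (mid + 1)))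
      else
        localmaximumAltGo fuel (PySem.List.slice xs (some (mid + 1)) none)

def localmaximum_alt (array : List Int) : Int :=
  localmaximumAltGo array.length array

-- ===== PRECONDITION & SPEC =====
-- Pre_: on the empty list both A and B raise IndexError at the final element access.
def Pre_localmaximum (array : List Int) : Prop := array ≠ []
instance (array : List Int) : Decidable (Pre_localmaximum array) := by unfold Pre_localmaximum; infer_instance
def pvWitness_localmaximum : List Int := [1, 3, 2]

def Spec_localmaximum (array : List Int) (out : Int) : Prop := out = localmaximum_alt array
instance (array : List Int) (out : Int) : Decidable (Spec_localmaximum array out) := by unfold Spec_localmaximum; infer_instance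

-- ===== CLAIM (what is proved, stated in full; the proofs are below) =====
def Claim_equal_localmaximum : Prop := ∀ (array : List Int), Dom_localmaximum array → Pre_localmaximum array → Spec_localmaximum array (localmaximum array)

-- ===== LEMMAS AND PROOFS =====

-- Indexing into the window (drop s / take L) is indexing into `array` at offset s.
lemma pyGetD_window (array : List Int) (s L : Nat) (i : Int)
    (h0 : 0 ≤ i) (hiL : i < (L : Int)) (hlen : (s : Int) + i < (array.length : Int)) :
    PySem.List.pyGetD ((array.drop s).take L) i 0 = PySem.List.pyGetD array ((s : Int) + i) 0 := by
  rw [PySem.List.pyGetD_eq_getElem _ _ h0 (by simp; omega),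
      PySem.List.pyGetD_eq_getElem _ _ (by omega) (by omega)]
  rw [List.getElem_take, List.getElem_drop]
  congr 1
  omega

-- The loop on window [s, e] of `array` equals B's recursion on the corresponding sublist,
-- for any sufficient fuels.
lemma loop_eq_altGo (fA : Nat) : ∀ (fB : Nat) (array : List Int) (s e : Int),
    (e - s).toNat ≤ fA → (e - s).toNat < fB → 0 ≤ s → s ≤ e → e < (array.length : Int) →
    localmaximumLoop array fA s e =
      localmaximumAltGo fB ((array.drop s.toNat).take (e - s + 1).toNat) := by
  induction fA with
  | zero =>
    intro fB array s e hfA hfB h0 hse hlen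
    -- fuel 0 forces s = e: the window is the singleton [array[s]]
    have hseq : s = e := by omega
    obtain ⟨g, hg⟩ : ∃ g, fB = g + 1 := ⟨fB - 1, by omega⟩
    subst hg
    rw [localmaximumLoop, localmaximumAltGo]
    rw [if_pos (by simp; omega)]
    have := pyGetD_window array s.toNat ((e - s + 1).toNat) 0
      (le_refl 0) (by omega) (by omega)
    rw [this]
    congr 1
    omega
  | succ fA ih =>
    intro fB array s e hfA hfB h0 hse hlen
    set sub : List Int := (array.drop s.toNat).take (e - s + 1).toNat with hsub
    have hsublen : sub.length = (e - s + 1).toNat := by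
      simp [hsub]; omega
    obtain ⟨g, hg⟩ : ∃ g, fB = g + 1 := ⟨fB - 1, by omega⟩
    subst hg
    rw [localmaximumLoop, localmaximumAltGo]
    by_cases hlt : s < e
    · -- one iteration of the loop; alt recurses on a slice of the window
      rw [if_pos hlt, if_neg (show ¬ (sub.length ≤ 1) by omega)]
      have hm : PySem.Int.floordiv (s + e) 2 = (s + e) / 2 :=
        PySem.Int.floordiv_eq_ediv_of_pos (by omega)
      have hm' : PySem.Int.floordiv ((sub.length : Int) - 1) 2 = ((sub.length : Int) - 1) / 2 :=
        PySem.Int.floordiv_eq_ediv_of_pos (by omega)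
      obtain ⟨m, hmdef⟩ : ∃ m : Int, m = (s + e) / 2 := ⟨_, rfl⟩
      have hms : s ≤ m := by omega
      have hme : m < e := by omega
      rw [hm, ← hmdef, hm']
      have hmid' : ((sub.length : Int) - 1) / 2 = m - s := by
        rw [hsublen]; omega
      rw [hmid']
      simp only []
      have hg1 : PySem.List.pyGetD sub (m - s) 0 = PySem.List.pyGetD array m 0 := by
        have := pyGetD_window array s.toNat ((e - s + 1).toNat) (m - s)
          (by omega) (by omega) (by omega)
        rw [← hsub] at this
        rw [this]; congr 1; omega
      have hg2 : PySem.List.pyGetD sub (m - s + 1) 0 = PySem.List.pyGetD array (m + 1) 0 := by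
        have := pyGetD_window array s.toNat ((e - s + 1).toNat) (m - s + 1)
          (by omega) (by omega) (by omega)
        rw [← hsub] at this
        rw [this]; congr 1; omega
      rw [hg1, hg2]
      by_cases hc : PySem.List.pyGetD array m 0 > PySem.List.pyGetD array (m + 1) 0
      · rw [if_pos hc, if_pos hc]
        have hslice : PySem.List.slice sub none (some (m - s + 1)) =
            (array.drop s.toNat).take (m - s + 1).toNat := by
          rw [PySem.List.slice_to sub (show (0:Int) ≤ m - s + 1 by omega), hsub, List.take_take]
          congr 1; omega
        rw [hslice]
        exact ih g array s m (by omega) (by omega) h0 hms (by omega)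
      · rw [if_neg hc, if_neg hc]
        have hslice : PySem.List.slice sub (some (m - s + 1)) none =
            (array.drop (m + 1).toNat).take (e - (m + 1) + 1).toNat := by
          rw [PySem.List.slice_from sub (show (0:Int) ≤ m - s + 1 by omega), hsub,
              List.drop_take, List.drop_drop]
          congr 1
          · omega
          · congr 1
            omega
        rw [hslice]
        exact ih g array (m + 1) e (by omega) (by omega) (by omega) (by omega) hlen
    · -- s = e : the window is the singleton [array[s]]
      have hseq : s = e := le_antisymm hse (not_lt.mp hlt)
      rw [if_neg hlt, if_pos (by omega)]
      have := pyGetD_window array s.toNat ((e - s + 1).toNat) 0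
        (le_refl 0) (by omega) (by omega)
      rw [← hsub] at this
      rw [this]
      congr 1
      omega

theorem localmaximum_spec : Claim_equal_localmaximum := by
  intro array hdom hpre
  unfold Spec_localmaximum localmaximum localmaximum_alt
  have hlen : 1 ≤ array.length := by
    cases array with
    | nil => exact absurd rfl hpre
    | cons a t => simp
  have h := loop_eq_altGo (((array.length : Int) - 1 - 0).toNat) array.length array
    0 ((array.length : Int) - 1) (by omega) (by omega) (le_refl 0) (by omega) (by omega)
  rw [h]
  congr 1
  simp
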